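-- pv_equiv track=rewrite | github.com/vanshjaiswal/Data-Structure-and-Algorithms | LeetCode_Challenge/Aug18_2024/count_substring_k.py | countKConstraintSubstrings3
-- ===== SOURCE A (Python) =====
-- def countKConstraintSubstrings3(s: str, k: int) -> int:
--     total: int = 0
--     ones = zeros = 0
--     left: int = 0
--     for right in range(len(s)):
--         if s[right] == '1':
--             ones += 1
--         else: zeros += 1
--         while ones > k and zeros > k:
--             if s[left] == '1':
--                 ones -= 1
--             else: zeros -= 1
--             left += 1
--         total += right - left + 1
--     return total
-- ===== SOURCE B (Python) =====
-- def countKConstraintSubstrings3(s: str, k: int) -> int: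
--     n = len(s)
--     P = [0]
--     for c in s:
--         P.append(P[-1] + (1 if c == '1' else 0))
--     total = 0
--     for right in range(n):
--         lo, hi = 0, right + 1
--         while lo < hi:
--             mid = (lo + hi) // 2
--             ones = P[right + 1] - P[mid]
--             zeros = (right + 1 - mid) - ones
--             if ones <= k or zeros <= k:
--                 hi = mid
--             else:
--                 lo = mid + 1
--         total += right - lo + 1
--     return total
-- ===== Notes on version B (the rewrite author's own statement) =====
-- stated objective: alternative
-- what changed: Replaces the sliding-window two-pointer scan with a prefix-sum array plus, for each right end, a binary search for the smallest valid window start (validity is monotone in the start).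
import Mathlib
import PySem

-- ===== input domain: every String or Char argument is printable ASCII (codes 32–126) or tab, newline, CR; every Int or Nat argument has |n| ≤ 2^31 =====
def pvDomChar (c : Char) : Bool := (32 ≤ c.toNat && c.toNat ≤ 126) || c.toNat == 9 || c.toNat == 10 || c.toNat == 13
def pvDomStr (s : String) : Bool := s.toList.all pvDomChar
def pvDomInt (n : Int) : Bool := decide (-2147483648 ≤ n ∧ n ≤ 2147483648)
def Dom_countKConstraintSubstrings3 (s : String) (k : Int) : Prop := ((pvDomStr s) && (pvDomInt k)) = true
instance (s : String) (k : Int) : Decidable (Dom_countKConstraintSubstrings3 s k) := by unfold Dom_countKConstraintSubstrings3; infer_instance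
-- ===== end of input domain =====

-- B replaces A's sliding-window scan by prefix sums + a binary search for the smallest valid
-- window start per right end (objective: alternative algorithm, similar cost).
-- A mutates nothing; equivalence is about the return value.

-- ===== PORT A =====
-- inner `while ones > k and zeros > k:` loop; fuel-bounded, none = IndexError on s[left]
def pvWhileA (cs : List Char) (k : Int) : Int → Int → Int → Nat → Option (Int × Int × Int)
  | _, _, _, 0 => none
  | ones, zeros, left, fuel + 1 =>
    if ones > k ∧ zeros > k then
      match PySem.List.pyGet? cs left with
      | none => none
      | some c =>
        if c = '1' then pvWhileA cs k (ones - 1) zeros (left + 1) fuel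
        else pvWhileA cs k ones (zeros - 1) (left + 1) fuel
    else some (ones, zeros, left)

-- one iteration of A's `for right in range(len(s))` loop over state (total, ones, zeros, left)
def pvStepA (cs : List Char) (k : Int) (st : Option (Int × Int × Int × Int)) (right : Int) :
    Option (Int × Int × Int × Int) :=
  match st with
  | none => none
  | some (total, ones, zeros, left) =>
    match PySem.List.pyGet? cs right with
    | none => none
    | some c =>
      let (ones, zeros) := if c = '1' then (ones + 1, zeros) else (ones, zeros + 1)
      match pvWhileA cs k ones zeros left (cs.length + 1) with
      | none => none
      | some (ones, zeros, left) => some (total + (right - left + 1), ones, zeros, left)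

def countKConstraintSubstrings3 (s : String) (k : Int) : Int :=
  let cs := s.toList
  match (PySem.List.pyRange 0 (cs.length : Int) 1).foldl (pvStepA cs k) (some (0, 0, 0, 0)) with
  | some (total, _, _, _) => total
  | none => 0   -- unreachable under Pre_ (the Python raises IndexError there)

-- ===== PORT B =====
-- P = [0]; for c in s: P.append(P[-1] + (1 if c == '1' else 0))
def pvPrefix (cs : List Char) : List Int :=
  cs.foldl (fun P c => P ++ [PySem.List.pyGetD P (-1) 0 + (if c = '1' then 1 else 0)]) [0]

-- `while lo < hi:` binary search for the smallest valid window start; fuel-bounded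
def pvBS (P : List Int) (k right : Int) : Int → Int → Nat → Int
  | lo, _, 0 => lo
  | lo, hi, fuel + 1 =>
    if lo < hi then
      let mid := PySem.Int.floordiv (lo + hi) 2
      let ones := PySem.List.pyGetD P (right + 1) 0 - PySem.List.pyGetD P mid 0
      let zeros := (right + 1 - mid) - ones
      if ones ≤ k ∨ zeros ≤ k then pvBS P k right lo mid fuel
      else pvBS P k right (mid + 1) hi fuel
    else lo

def countKConstraintSubstrings3_alt (s : String) (k : Int) : Int :=
  let cs := s.toList
  let P := pvPrefix cs
  (PySem.List.pyRange 0 (cs.length : Int) 1).foldl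
    (fun total right => total + (right - pvBS P k right 0 (right + 1) (right + 2).toNat + 1)) 0

-- ===== PRECONDITION & SPEC =====
-- Pre_ restricts k to the natural domain k ≥ 0 (empty s is fine for any k): for k < 0 and
-- nonempty s the Python A always raises IndexError in its shrink loop.
def Pre_countKConstraintSubstrings3 (s : String) (k : Int) : Prop := 0 ≤ k ∨ s.toList = []
instance (s : String) (k : Int) : Decidable (Pre_countKConstraintSubstrings3 s k) := by
  unfold Pre_countKConstraintSubstrings3; infer_instance

def pvWitness_countKConstraintSubstrings3 : String × Int := ("10101", 1)

def Spec_countKConstraintSubstrings3 (s : String) (k : Int) (out : Int) : Prop := out = countKConstraintSubstrings3_alt s k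
instance (s : String) (k : Int) (out : Int) : Decidable (Spec_countKConstraintSubstrings3 s k out) := by unfold Spec_countKConstraintSubstrings3; infer_instance

-- ===== CLAIM (what is proved, stated in full; the proofs are below) =====
def Claim_equal_countKConstraintSubstrings3 : Prop := ∀ (s : String) (k : Int), Dom_countKConstraintSubstrings3 s k → Pre_countKConstraintSubstrings3 s k → Spec_countKConstraintSubstrings3 s k (countKConstraintSubstrings3 s k)

-- ===== LEMMAS AND PROOFS =====

-- number of '1's in cs[:i]
def pvP (cs : List Char) (i : Nat) : Nat := (cs.take i).count '1'

-- the window cs[l:m] is valid: ones ≤ k or zeros ≤ k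
def pvGood (cs : List Char) (k : Int) (l m : Nat) : Prop :=
  ((pvP cs m : Int) - pvP cs l ≤ k) ∨ ((m : Int) - l - ((pvP cs m : Int) - pvP cs l) ≤ k)

theorem pvP_mono (cs : List Char) {l m : Nat} (h : l ≤ m) :
    pvP cs l ≤ pvP cs m ∧ pvP cs m ≤ pvP cs l + (m - l) := by
  have hm : m = l + (m - l) := by omega
  rw [pvP, pvP, hm, List.take_add, List.count_append]
  constructor
  · omega
  · have := List.count_le_length (l := (cs.drop l).take (m - l)) (a := '1')
    have hlen : ((cs.drop l).take (m - l)).length ≤ m - l := by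
      simp [List.length_take]
    omega

theorem pvP_succ (cs : List Char) {i : Nat} (h : i < cs.length) :
    pvP cs (i + 1) = pvP cs i + (if cs[i] = '1' then 1 else 0) := by
  rw [pvP, pvP, List.take_succ, List.count_append, List.getElem?_eq_getElem h]
  by_cases hc : cs[i] = '1'
  · simp [hc]
  · simp [hc]

theorem pvP_succ_one (cs : List Char) {i : Nat} (h : i < cs.length) (hc : cs[i] = '1') :
    pvP cs (i + 1) = pvP cs i + 1 := by
  rw [pvP_succ cs h, if_pos hc]

theorem pvP_succ_zero (cs : List Char) {i : Nat} (h : i < cs.length) (hc : ¬ cs[i] = '1') :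
    pvP cs (i + 1) = pvP cs i := by
  rw [pvP_succ cs h, if_neg hc]
  omega

theorem pvNotGood_mono_l (cs : List Char) (k : Int) {l l' m : Nat} (hll : l ≤ l')
    (h : ¬ pvGood cs k l' m) : ¬ pvGood cs k l m := by
  have h1 := pvP_mono cs hll
  unfold pvGood at *
  push_neg at *
  omega

theorem pvNotGood_mono_m (cs : List Char) (k : Int) {l m m' : Nat} (hmm : m ≤ m')
    (h : ¬ pvGood cs k l m) : ¬ pvGood cs k l m' := by
  have h1 := pvP_mono cs hmm
  unfold pvGood at *
  push_neg at *
  omega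

theorem pvGood_refl (cs : List Char) {k : Int} (hk : 0 ≤ k) (m : Nat) : pvGood cs k m m := by
  unfold pvGood; omega

theorem pvLeast_unique (cs : List Char) (k : Int) {a b m : Nat}
    (ha : pvGood cs k a m) (ha' : ∀ l < a, ¬ pvGood cs k l m)
    (hb : pvGood cs k b m) (hb' : ∀ l < b, ¬ pvGood cs k l m) : a = b := by
  rcases lt_trichotomy a b with h | h | h
  · exact absurd ha (hb' a h)
  · exact h
  · exact absurd hb (ha' b h)

theorem pvWhileA_spec (cs : List Char) (k : Int) (hk : 0 ≤ k) (m : Nat) (hm : m ≤ cs.length) :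
    ∀ (fuel ℓ : Nat), ℓ ≤ m → m - ℓ < fuel →
    (∀ l < ℓ, ¬ pvGood cs k l m) →
    ∃ ℓ' : Nat, ℓ' ≤ m ∧
      pvWhileA cs k ((pvP cs m : Int) - pvP cs ℓ) ((m : Int) - ℓ - ((pvP cs m : Int) - pvP cs ℓ))
        (ℓ : Int) fuel
      = some ((pvP cs m : Int) - pvP cs ℓ', (m : Int) - ℓ' - ((pvP cs m : Int) - pvP cs ℓ'), (ℓ' : Int)) ∧
      pvGood cs k ℓ' m ∧ ∀ l < ℓ', ¬ pvGood cs k l m := by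
  intro fuel
  induction fuel with
  | zero => intro ℓ h1 h2; omega
  | succ fuel ih =>
    intro ℓ hℓm hfuel hmin
    by_cases hg : pvGood cs k ℓ m
    · refine ⟨ℓ, hℓm, ?_, hg, hmin⟩
      rw [pvWhileA]
      have hcond : ¬ ((pvP cs m : Int) - pvP cs ℓ > k ∧ (m : Int) - ℓ - ((pvP cs m : Int) - pvP cs ℓ) > k) := by
        unfold pvGood at hg; omega
      simp only [if_neg hcond]
    · -- window invalid: ℓ < m, shrink
      have hℓlt : ℓ < m := by
        rcases Nat.lt_or_ge ℓ m with h | h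
        · exact h
        · exfalso; apply hg
          have : ℓ = m := by omega
          subst this; exact pvGood_refl cs hk ℓ
      have hcond : ((pvP cs m : Int) - pvP cs ℓ > k ∧ (m : Int) - ℓ - ((pvP cs m : Int) - pvP cs ℓ) > k) := by
        unfold pvGood at hg; push_neg at hg; omega
      have hget : PySem.List.pyGet? cs (ℓ : Int) = some cs[ℓ] := by
        rw [PySem.List.pyGet?_natCast]
        exact List.getElem?_eq_getElem (by omega)
      have hPsucc := pvP_succ cs (by omega : ℓ < cs.length)
      have hmin' : ∀ l < ℓ + 1, ¬ pvGood cs k l m := by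
        intro l hl
        rcases Nat.lt_or_ge l ℓ with h | h
        · exact hmin l h
        · have : l = ℓ := by omega
          subst this; exact hg
      obtain ⟨ℓ', h1, h2, h3, h4⟩ := ih (ℓ + 1) (by omega) (by omega) hmin'
      refine ⟨ℓ', h1, ?_, h3, h4⟩
      rw [pvWhileA, if_pos hcond, hget]
      dsimp only
      by_cases hc : cs[ℓ] = '1'
      · rw [if_pos hc]
        rw [hc] at hPsucc; simp at hPsucc
        have e1 : (pvP cs m : Int) - pvP cs ℓ - 1 = (pvP cs m : Int) - pvP cs (ℓ + 1) := by
          have := (pvP_mono cs (le_of_lt hℓlt)).1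
          have h2' := pvP_mono cs (show ℓ + 1 ≤ m by omega)
          omega
        have e2 : (m : Int) - ℓ - ((pvP cs m : Int) - pvP cs ℓ) = (m : Int) - (ℓ + 1) - ((pvP cs m : Int) - pvP cs (ℓ + 1)) := by
          omega
        have e3 : (ℓ : Int) + 1 = ((ℓ + 1 : Nat) : Int) := by push_cast; ring
        rw [e1, e2, e3, h2]
      · rw [if_neg hc]
        rw [if_neg hc] at hPsucc; simp at hPsucc
        have e1 : pvP cs (ℓ + 1) = pvP cs ℓ := by omega
        have e2 : (m : Int) - ℓ - ((pvP cs m : Int) - pvP cs ℓ) - 1 = (m : Int) - (ℓ + 1) - ((pvP cs m : Int) - pvP cs (ℓ + 1)) := by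
          rw [e1]; push_cast; ring
        have e3 : (ℓ : Int) + 1 = ((ℓ + 1 : Nat) : Int) := by push_cast; ring
        rw [e2, e3, ← e1, h2]

-- pvPrefix computes the prefix-count table
theorem pvPrefix_eq (cs : List Char) :
    pvPrefix cs = (List.range (cs.length + 1)).map (fun i => (pvP cs i : Int)) := by
  induction cs using List.reverseRecOn with
  | nil => simp [pvPrefix, pvP]
  | append_singleton cs c ih =>
    rw [pvPrefix, List.foldl_append] at *
    rw [ih]
    have hne : (List.range (cs.length + 1)).map (fun i => (pvP cs i : Int)) ≠ [] := by
      simp [List.range_succ]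
    have hlast : PySem.List.pyGetD ((List.range (cs.length + 1)).map (fun i => (pvP cs i : Int))) (-1) 0
        = (pvP cs cs.length : Int) := by
      rw [PySem.List.pyGetD_neg_one _ _ hne, List.getLast_eq_getElem]
      simp
    simp only [List.foldl_cons, List.foldl_nil, hlast]
    have hPsame : ∀ i ≤ cs.length, pvP (cs ++ [c]) i = pvP cs i := by
      intro i hi
      rw [pvP, pvP, List.take_append_of_le_length hi]
    have hPlast : (pvP (cs ++ [c]) (cs.length + 1) : Int) = (pvP cs cs.length : Int) + (if c = '1' then 1 else 0) := by
      have := pvP_succ (cs ++ [c]) (i := cs.length) (by simp)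
      rw [this, hPsame cs.length le_rfl]
      have : (cs ++ [c])[cs.length] = c := by
        rw [List.getElem_append_right le_rfl]; simp
      rw [this]
      split <;> push_cast <;> ring
    rw [List.length_append, List.length_singleton]
    have hr : List.range (cs.length + 1 + 1) = List.range (cs.length + 1) ++ [cs.length + 1] :=
      List.range_succ
    rw [hr, List.map_append]
    congr 1
    · apply List.map_congr_left
      intro i hi
      simp only [List.mem_range] at hi
      rw [hPsame i (by omega)]
    · simp [hPlast]

theorem pvPrefix_get (cs : List Char) {i : Nat} (h : i ≤ cs.length) :
    PySem.List.pyGetD (pvPrefix cs) (i : Int) 0 = (pvP cs i : Int) := by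
  rw [pvPrefix_eq, PySem.List.pyGetD_natCast]
  rw [List.getD_eq_getElem?_getD]
  rw [List.getElem?_map]
  simp [List.getElem?_range (by omega : i < cs.length + 1)]

theorem pvBS_spec (cs : List Char) (k : Int) (m : Nat) (hm : m ≤ cs.length) (right : Int)
    (hr : right + 1 = (m : Int)) :
    ∀ (fuel a b : Nat), a ≤ b → b ≤ m → b - a < fuel →
    (∀ l < a, ¬ pvGood cs k l m) → pvGood cs k b m →
    ∃ ℓ : Nat, pvBS (pvPrefix cs) k right (a : Int) (b : Int) fuel = (ℓ : Int) ∧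
      pvGood cs k ℓ m ∧ ∀ l < ℓ, ¬ pvGood cs k l m := by
  intro fuel
  induction fuel with
  | zero => intro a b h1 h2 h3; omega
  | succ fuel ih =>
    intro a b hab hbm hfuel hmin hgb
    by_cases hlt : a < b
    · have hmid : PySem.Int.floordiv ((a : Int) + (b : Int)) 2 = (((a + b) / 2 : Nat) : Int) := by
        have : (a : Int) + (b : Int) = ((a + b : Nat) : Int) := by push_cast; ring
        rw [this]
        exact_mod_cast PySem.Int.floordiv_natCast (a + b) 2
      set c : Nat := (a + b) / 2 with hc
      have hac : a ≤ c := by omega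
      have hcb : c < b := by omega
      have hgetm : PySem.List.pyGetD (pvPrefix cs) (right + 1) 0 = (pvP cs m : Int) := by
        rw [hr]; exact pvPrefix_get cs hm
      have hgetc : PySem.List.pyGetD (pvPrefix cs) ((c : Nat) : Int) 0 = (pvP cs c : Int) := by
        exact pvPrefix_get cs (by omega)
      rw [pvBS]
      rw [if_pos (by exact_mod_cast hlt)]
      simp only [hmid, hgetm, hgetc]
      by_cases hgc : pvGood cs k c m
      · have hcond : (pvP cs m : Int) - pvP cs c ≤ k ∨ right + 1 - ((c : Nat) : Int) - ((pvP cs m : Int) - pvP cs c) ≤ k := by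
          unfold pvGood at hgc; omega
        rw [if_pos hcond]
        exact ih a c hac (by omega) (by omega) hmin hgc
      · have hcond : ¬ ((pvP cs m : Int) - pvP cs c ≤ k ∨ right + 1 - ((c : Nat) : Int) - ((pvP cs m : Int) - pvP cs c) ≤ k) := by
          unfold pvGood at hgc; push_neg at *; omega
        rw [if_neg hcond]
        have hmin' : ∀ l < c + 1, ¬ pvGood cs k l m := by
          intro l hl
          rcases Nat.lt_or_ge l a with h | h
          · exact hmin l h
          · exact pvNotGood_mono_l cs k (by omega) hgc
        have := ih (c + 1) b (by omega) hbm (by omega) hmin' hgb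
        have ecast : ((c : Nat) : Int) + 1 = ((c + 1 : Nat) : Int) := by push_cast; ring
        rw [ecast]
        exact this
    · have hab' : a = b := by omega
      subst hab'
      rw [pvBS, if_neg (by exact_mod_cast hlt)]
      exact ⟨a, rfl, hgb, hmin⟩

-- joint invariant for the two outer folds
theorem pvMain (cs : List Char) (k : Int) (hk : 0 ≤ k) :
    ∀ m, m ≤ cs.length →
    ∃ (T : Int) (ℓ : Nat), ℓ ≤ m ∧
      (PySem.List.pyRange 0 (m : Int) 1).foldl (pvStepA cs k) (some (0, 0, 0, 0))
        = some (T, (pvP cs m : Int) - pvP cs ℓ, (m : Int) - ℓ - ((pvP cs m : Int) - pvP cs ℓ), (ℓ : Int)) ∧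
      pvGood cs k ℓ m ∧ (∀ l < ℓ, ¬ pvGood cs k l m) ∧
      (PySem.List.pyRange 0 (m : Int) 1).foldl
        (fun total right => total + (right - pvBS (pvPrefix cs) k right 0 (right + 1) (right + 2).toNat + 1)) 0 = T := by
  intro m
  induction m with
  | zero =>
    intro _
    refine ⟨0, 0, le_rfl, ?_, pvGood_refl cs hk 0, by omega, ?_⟩
    · simp only [Nat.cast_zero]
      rw [PySem.List.pyRange_one_eq_nil le_rfl]; simp [pvP]
    · simp only [Nat.cast_zero]
      rw [PySem.List.pyRange_one_eq_nil le_rfl]; rfl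
  | succ m ih =>
    intro hm1
    obtain ⟨T, ℓ, hℓm, hA, hgood, hmin, hB⟩ := ih (by omega)
    have hsplit : PySem.List.pyRange 0 ((m + 1 : Nat) : Int) 1 = PySem.List.pyRange 0 (m : Int) 1 ++ [(m : Int)] := by
      have : ((m + 1 : Nat) : Int) = (m : Int) + 1 := by push_cast; ring
      rw [this, PySem.List.pyRange_one_succ_right (by positivity)]
    -- A side one step
    have hget : PySem.List.pyGet? cs ((m : Nat) : Int) = some cs[m] := by
      rw [PySem.List.pyGet?_natCast]
      exact List.getElem?_eq_getElem (by omega)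
    have hPsucc := pvP_succ cs (show m < cs.length by omega)
    have hmin' : ∀ l < ℓ, ¬ pvGood cs k l (m + 1) := fun l hl =>
      pvNotGood_mono_m cs k (by omega) (hmin l hl)
    obtain ⟨ℓ', hℓ'm, hwhile, hgood', hmin''⟩ :=
      pvWhileA_spec cs k hk (m + 1) hm1 (cs.length + 1) ℓ (by omega) (by omega) hmin'
    obtain ⟨ℓ'', hbs, hgood'', hmin'''⟩ :=
      pvBS_spec cs k (m + 1) hm1 (m : Int) (by push_cast; ring)
        ((m : Int) + 2).toNat 0 (m + 1) (by omega) le_rfl (by omega)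
        (by omega) (pvGood_refl cs hk (m + 1))
    have hℓeq : ℓ' = ℓ'' := pvLeast_unique cs k hgood' hmin'' hgood'' hmin'''
    refine ⟨T + ((m : Int) - ℓ' + 1), ℓ', hℓ'm, ?_, hgood', hmin'', ?_⟩
    · rw [hsplit, List.foldl_append, hA]
      simp only [List.foldl_cons, List.foldl_nil]
      rw [pvStepA, hget]
      dsimp only
      by_cases hc : cs[m] = '1'
      · have hP1 : pvP cs (m + 1) = pvP cs m + 1 := pvP_succ_one cs (show m < cs.length by omega) hc
        simp only [if_pos hc]
        have e1 : (pvP cs m : Int) - pvP cs ℓ + 1 = (pvP cs (m + 1) : Int) - pvP cs ℓ := by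
          rw [hP1]; push_cast; ring
        have e2 : (m : Int) - ℓ - ((pvP cs m : Int) - pvP cs ℓ) = ((m + 1 : Nat) : Int) - ℓ - ((pvP cs (m + 1) : Int) - pvP cs ℓ) := by
          rw [hP1]; push_cast; ring
        rw [e1, e2, hwhile]
      · have hP1 : pvP cs (m + 1) = pvP cs m := pvP_succ_zero cs (show m < cs.length by omega) hc
        simp only [if_neg hc]
        have e1 : (pvP cs m : Int) - pvP cs ℓ = (pvP cs (m + 1) : Int) - pvP cs ℓ := by rw [hP1]
        have e2 : (m : Int) - ℓ - ((pvP cs m : Int) - pvP cs ℓ) + 1 = ((m + 1 : Nat) : Int) - ℓ - ((pvP cs (m + 1) : Int) - pvP cs ℓ) := by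
          rw [hP1]; push_cast; ring
        rw [e2, e1, hwhile]
    · rw [hsplit, List.foldl_append, hB]
      simp only [List.foldl_cons, List.foldl_nil]
      simp only [Nat.cast_zero, Nat.cast_add, Nat.cast_one] at hbs
      rw [hbs, hℓeq]

-- ===== VERDICT (by name: the statement is the Claim_ definition above) =====
theorem countKConstraintSubstrings3_spec : Claim_equal_countKConstraintSubstrings3 := by
  intro s k _ hpre
  unfold Spec_countKConstraintSubstrings3
  rcases hpre with hk | hnil
  · obtain ⟨T, ℓ, _, hA, _, _, hB⟩ := pvMain s.toList k hk s.toList.length le_rfl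
    simp only [countKConstraintSubstrings3, countKConstraintSubstrings3_alt]
    rw [hA, hB]
  · unfold countKConstraintSubstrings3 countKConstraintSubstrings3_alt
    rw [hnil]
    rfl
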